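-- pv_equiv track=rewrite | github.com/shalgrim/advent-of-code | python/y2023/day02_1.py | get_nums_possible_with
-- ===== SOURCE A (Python) =====
-- def get_nums_possible_with(games, given):
--     answer = []
--     for game_num, draws in games.items():
--         game_possible = True
--         for draw in draws:
--             if not game_possible:
--                 break
--             for color in ["red", "green", "blue"]:
--                 if draw.get(color, 0) > given[color]:
--                     game_possible = False
--                     break
--         if game_possible:
--             answer.append(game_num)
--     return answer
-- ===== SOURCE B (Python) =====
-- def get_nums_possible_with(games, given):
--     # color-major pass: collect the set of impossible games one color at a time,
--     # then emit the game numbers (in order) that were never marked impossible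
--     bad = set()
--     for color in ["red", "green", "blue"]:
--         for game_num, draws in games.items():
--             if game_num in bad:
--                 continue
--             if any(draw.get(color, 0) > given[color] for draw in draws):
--                 bad.add(game_num)
--     return [game_num for game_num in games if game_num not in bad]
-- ===== Notes on version B (the rewrite author's own statement) =====
-- stated objective: alternative
-- what changed: B inverts the loop nesting: instead of A's game-by-game scan with a game_possible flag and break-based early exit, B makes one pass per color over all games accumulating a set of impossible game numbers, then emits the game numbers never marked.
import Mathlib
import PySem

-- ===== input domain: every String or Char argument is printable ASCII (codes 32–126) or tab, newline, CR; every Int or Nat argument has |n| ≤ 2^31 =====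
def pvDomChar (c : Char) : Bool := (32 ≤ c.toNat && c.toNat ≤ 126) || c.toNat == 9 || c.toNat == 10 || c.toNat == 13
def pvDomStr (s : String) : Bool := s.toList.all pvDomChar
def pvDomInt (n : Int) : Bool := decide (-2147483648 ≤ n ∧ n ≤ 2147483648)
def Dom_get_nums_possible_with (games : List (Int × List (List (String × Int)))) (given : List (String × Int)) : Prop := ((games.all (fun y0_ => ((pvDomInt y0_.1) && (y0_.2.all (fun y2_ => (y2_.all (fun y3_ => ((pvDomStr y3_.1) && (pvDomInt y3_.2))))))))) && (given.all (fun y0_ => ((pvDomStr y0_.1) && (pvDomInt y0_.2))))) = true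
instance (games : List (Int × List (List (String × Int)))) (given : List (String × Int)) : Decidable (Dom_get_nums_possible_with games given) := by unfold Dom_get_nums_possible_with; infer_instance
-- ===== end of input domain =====

-- B replaces A's game-by-game scan (flag + break) by a color-major pass: for each of the three
-- colors it collects the set of games some draw of which exceeds that color's limit, then emits
-- the game numbers that were never marked (objective: alternative).

-- ===== PORT A =====
-- dict lookup given[c] (first match) modelled totally via .getD 0; Python raises KeyError
-- when the key is absent — exactly those inputs are excluded by Pre_ below.
def pvColors : List String := ["red", "green", "blue"]

-- inner 'for color in [...]' loop with its break, carried flag game_possible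
def pvCheckColors (given draw : List (String × Int)) (gp : Bool) : Bool :=
  pvColors.foldl (fun gp c =>
    if gp then
      (if (draw.lookup c).getD 0 > (given.lookup c).getD 0 then false else gp)
    else gp) gp

-- 'for draw in draws: if not game_possible: break'
def pvLoopDraws (given : List (String × Int)) : List (List (String × Int)) → Bool → Bool
  | [], gp => gp
  | d :: rest, gp => if gp = false then gp else pvLoopDraws given rest (pvCheckColors given d gp)

def get_nums_possible_with (games : List (Int × List (List (String × Int)))) (given : List (String × Int)) : List Int :=
  games.foldl (fun answer p =>
    let gp := pvLoopDraws given p.2 true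
    if gp then answer ++ [p.1] else answer) []

-- ===== PORT B =====
-- inner 'for game_num, draws in games.items(): if game_num in bad: continue; if any(...): bad.add'
def pvMarkColor (games : List (Int × List (List (String × Int)))) (given : List (String × Int)) (c : String) (bad : PySem.Set Int) : PySem.Set Int :=
  games.foldl (fun bad p =>
    if PySem.Set.contains bad p.1 then bad
    else if p.2.any (fun d => (d.lookup c).getD 0 > (given.lookup c).getD 0) then PySem.Set.add bad p.1
    else bad) bad

def get_nums_possible_with_alt (games : List (Int × List (List (String × Int)))) (given : List (String × Int)) : List Int :=
  let bad := ["red", "green", "blue"].foldl (fun bad c => pvMarkColor games given c bad) PySem.Set.empty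
  (games.map Prod.fst).filter (fun g => !(PySem.Set.contains bad g))

-- ===== PRECONDITION & SPEC =====
-- Pre_ admits exactly the inputs on which Python A returns, plus the dict invariant: A raises
-- KeyError iff some game with a nonempty draw list lets the scan reach a color missing from
-- `given`; a missing key confines the scan to each game's first draw, so per game it suffices
-- that the first draw violates a limit strictly before the first missing color (trivially true
-- when all three keys are present). The Nodup clause only encodes that `games` is a Python
-- dict, whose keys are distinct by construction — it excludes no dict input.
def pvEarlyViolate (given d : List (String × Int)) : Bool :=
  match given.lookup "red", given.lookup "green", given.lookup "blue" with
  | none, _, _ => false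
  | some r, none, _ => decide (r < (d.lookup "red").getD 0)
  | some r, some g, none =>
      decide (r < (d.lookup "red").getD 0) || decide (g < (d.lookup "green").getD 0)
  | some _, some _, some _ => true

def Pre_get_nums_possible_with (games : List (Int × List (List (String × Int)))) (given : List (String × Int)) : Prop :=
  (games.all (fun p => match p.2 with
    | [] => true
    | d :: _ => pvEarlyViolate given d)) = true ∧ (games.map Prod.fst).Nodup

instance (games : List (Int × List (List (String × Int)))) (given : List (String × Int)) : Decidable (Pre_get_nums_possible_with games given) := by unfold Pre_get_nums_possible_with; infer_instance

def pvWitness_get_nums_possible_with : (List (Int × List (List (String × Int)))) × (List (String × Int)) :=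
  ([(1, [[("red", 4), ("blue", 3)]]), (2, [[("green", 9)]]), (3, [])],
   [("red", 4), ("green", 5), ("blue", 6)])

def Spec_get_nums_possible_with (games : List (Int × List (List (String × Int)))) (given : List (String × Int)) (out : List Int) : Prop := out = get_nums_possible_with_alt games given
instance (games : List (Int × List (List (String × Int)))) (given : List (String × Int)) (out : List Int) : Decidable (Spec_get_nums_possible_with games given out) := by unfold Spec_get_nums_possible_with; infer_instance

-- ===== CLAIM (what is proved, stated in full; the proofs are below) =====
def Claim_equal_get_nums_possible_with : Prop := ∀ (games : List (Int × List (List (String × Int)))) (given : List (String × Int)), Dom_get_nums_possible_with games given → Pre_get_nums_possible_with games given → Spec_get_nums_possible_with games given (get_nums_possible_with games given)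

-- ===== LEMMAS AND PROOFS =====

-- 'some draw of p exceeds the limit of color c' (the condition tested in B's inner loop)
def pvViol (given : List (String × Int)) (c : String) (p : Int × List (List (String × Int))) : Bool :=
  p.2.any (fun d => (d.lookup c).getD 0 > (given.lookup c).getD 0)

theorem pvContains_iff (s : PySem.Set Int) (x : Int) :
    PySem.Set.contains s x = true ↔ x ∈ s := by
  simp [PySem.Set.contains]

theorem pvLoopDraws_false (given : List (String × Int)) (draws : List (List (String × Int))) :
    pvLoopDraws given draws false = false := by
  cases draws <;> simp [pvLoopDraws]

theorem pvCheckColors_eq (given d : List (String × Int)) :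
    pvCheckColors given d true =
      (decide ((d.lookup "red").getD 0 ≤ (given.lookup "red").getD 0) &&
       decide ((d.lookup "green").getD 0 ≤ (given.lookup "green").getD 0) &&
       decide ((d.lookup "blue").getD 0 ≤ (given.lookup "blue").getD 0)) := by
  simp only [pvCheckColors, pvColors, List.foldl]
  split_ifs <;> simp_all

theorem pvLoopDraws_all (given : List (String × Int)) (draws : List (List (String × Int))) :
    pvLoopDraws given draws true = draws.all (fun d => pvCheckColors given d true) := by
  induction draws with
  | nil => rfl
  | cons d rest ih =>
      simp only [pvLoopDraws, List.all_cons]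
      cases h : pvCheckColors given d true with
      | false => simp [pvLoopDraws_false]
      | true => simp [ih]

-- A's per-game verdict = no color is violated by any draw
theorem pvGame_verdict (given : List (String × Int)) (p : Int × List (List (String × Int))) :
    pvLoopDraws given p.2 true =
      (!pvViol given "red" p && !pvViol given "green" p && !pvViol given "blue" p) := by
  rw [pvLoopDraws_all, Bool.eq_iff_iff]
  simp only [List.all_eq_true, pvCheckColors_eq, pvViol, Bool.and_eq_true, Bool.not_eq_true',
    List.any_eq_false, decide_eq_true_eq, not_lt]
  constructor
  · exact fun h => ⟨⟨fun d hd => ((h d hd).1).1, fun d hd => ((h d hd).1).2⟩, fun d hd => (h d hd).2⟩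
  · exact fun h d hd => ⟨⟨h.1.1 d hd, h.1.2 d hd⟩, h.2 d hd⟩

-- membership after one color pass of B
theorem pvStep_mem (given : List (String × Int)) (c : String) (bad : PySem.Set Int)
    (q : Int × List (List (String × Int))) (x : Int) :
    (x ∈ if PySem.Set.contains bad q.1 then bad
         else if q.2.any (fun d => (d.lookup c).getD 0 > (given.lookup c).getD 0)
         then PySem.Set.add bad q.1 else bad) ↔
      x ∈ bad ∨ (q.1 = x ∧ pvViol given c q = true) := by
  split_ifs with h1 h2
  · constructor
    · exact Or.inl
    · rintro (h | ⟨rfl, _⟩)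
      · exact h
      · simpa [PySem.Set.contains] using h1
  · rw [PySem.Set.mem_add]
    constructor
    · rintro (h | rfl)
      · exact Or.inl h
      · exact Or.inr ⟨rfl, by simpa [pvViol] using h2⟩
    · rintro (h | ⟨rfl, _⟩)
      · exact Or.inl h
      · exact Or.inr rfl
  · constructor
    · exact Or.inl
    · rintro (h | ⟨rfl, hv⟩)
      · exact h
      · exact absurd hv (by simpa [pvViol] using h2)

theorem pvMarkColor_mem (games : List (Int × List (List (String × Int)))) (given : List (String × Int))
    (c : String) (bad : PySem.Set Int) (x : Int) :
    x ∈ pvMarkColor games given c bad ↔ x ∈ bad ∨ ∃ p ∈ games, p.1 = x ∧ pvViol given c p = true := by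
  induction games generalizing bad with
  | nil => simp [pvMarkColor]
  | cons q rest ih =>
      simp only [pvMarkColor] at ih ⊢
      rw [List.foldl_cons, ih, pvStep_mem]
      constructor
      · rintro ((h | hqx) | ⟨p, hp, rfl, hv⟩)
        · exact Or.inl h
        · exact Or.inr ⟨q, List.mem_cons_self .., hqx.1, hqx.2⟩
        · exact Or.inr ⟨p, List.mem_cons_of_mem _ hp, rfl, hv⟩
      · rintro (h | ⟨p, hp, rfl, hv⟩)
        · exact Or.inl (Or.inl h)
        · rcases List.mem_cons.mp hp with rfl | hp'
          · exact Or.inl (Or.inr ⟨rfl, hv⟩)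
          · exact Or.inr ⟨p, hp', rfl, hv⟩

-- membership in B's final bad set
theorem pvBad_mem (games : List (Int × List (List (String × Int)))) (given : List (String × Int)) (x : Int) :
    x ∈ ["red", "green", "blue"].foldl (fun bad c => pvMarkColor games given c bad) PySem.Set.empty ↔
      ∃ p ∈ games, p.1 = x ∧
        (pvViol given "red" p || pvViol given "green" p || pvViol given "blue" p) = true := by
  simp only [List.foldl_cons, List.foldl_nil, pvMarkColor_mem, PySem.Set.empty]
  constructor
  · rintro (((h | ⟨p, hp, rfl, hv⟩) | ⟨p, hp, rfl, hv⟩) | ⟨p, hp, rfl, hv⟩)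
    · simp at h
    · exact ⟨p, hp, rfl, by simp [hv]⟩
    · exact ⟨p, hp, rfl, by simp [hv]⟩
    · exact ⟨p, hp, rfl, by simp [hv]⟩
  · rintro ⟨p, hp, rfl, hv⟩
    rcases Bool.or_eq_true_iff.mp hv with h | h
    · rcases Bool.or_eq_true_iff.mp h with h' | h'
      · exact Or.inl (Or.inl (Or.inr ⟨p, hp, rfl, h'⟩))
      · exact Or.inl (Or.inr ⟨p, hp, rfl, h'⟩)
    · exact Or.inr ⟨p, hp, rfl, h⟩

-- distinct keys → the entry owning a key is unique
theorem pvKey_inj (games : List (Int × List (List (String × Int))))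
    (hnd : (games.map Prod.fst).Nodup) {p q : Int × List (List (String × Int))}
    (hp : p ∈ games) (hq : q ∈ games) (e : p.1 = q.1) : p = q := by
  induction games with
  | nil => cases hp
  | cons r rest ih =>
      simp only [List.map_cons, List.nodup_cons] at hnd
      rcases List.mem_cons.mp hp with rfl | hp' <;> rcases List.mem_cons.mp hq with rfl | hq'
      · rfl
      · have h := List.mem_map_of_mem (f := Prod.fst) hq'
        rw [← e] at h; exact absurd h hnd.1
      · have h := List.mem_map_of_mem (f := Prod.fst) hp'
        rw [e] at h; exact absurd h hnd.1
      · exact ih hnd.2 hp' hq'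

-- ===== VERDICT (by name: the statement is the Claim_ definition above) =====
theorem get_nums_possible_with_spec : Claim_equal_get_nums_possible_with := by
  intro games given _ hpre
  unfold Spec_get_nums_possible_with get_nums_possible_with get_nums_possible_with_alt
  rw [PySem.List.foldl_append_if (p := fun p => pvLoopDraws given p.2 true) (f := Prod.fst),
      List.filter_map]
  simp only [List.nil_append]
  apply congrArg (List.map Prod.fst)
  apply List.filter_congr
  intro p hp
  rw [pvGame_verdict]
  have hmem : PySem.Set.contains
      (["red", "green", "blue"].foldl (fun bad c => pvMarkColor games given c bad) PySem.Set.empty) p.1 =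
      (pvViol given "red" p || pvViol given "green" p || pvViol given "blue" p) := by
    rw [Bool.eq_iff_iff, pvContains_iff, pvBad_mem]
    constructor
    · rintro ⟨q, hq, he, hv⟩
      rwa [pvKey_inj games hpre.2 hq hp he] at hv
    · intro hv; exact ⟨p, hp, rfl, hv⟩
  simp only [Function.comp_apply]
  rw [hmem]
  cases pvViol given "red" p <;> cases pvViol given "green" p <;>
    cases pvViol given "blue" p <;> rfl
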